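-- pv_equiv track=rewrite | github.com/WorryingWonton/PyBats | map_2.py | allSwap
-- ===== SOURCE A (Python) =====
-- def allSwap(strings):
--     first_chars = [x[0] for x in strings]
--     unique = {x: [idx for idx, c in enumerate(first_chars) if c == x] for x in first_chars}
--     for idx, sub in enumerate(strings):
--         if idx > unique[sub[0]][0] and sub[0] == first_chars[idx]:
--             strings[idx], strings[unique[sub[0]][0]] = strings[unique[sub[0]][0]], sub
--             unique[sub[0]] = unique[sub[0]][2:]
--     return strings
-- ===== SOURCE B (Python) =====
-- def allSwap(strings):
--     # One pass: pair each string's index with the pending unpaired index of the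
--     # same first character, recording a partner permutation; then rebuild in place.
--     pending = {}
--     partner = list(range(len(strings)))
--     for i, s in enumerate(strings):
--         c = s[0]
--         if c in pending:
--             j = pending.pop(c)
--             partner[i], partner[j] = j, i
--         else:
--             pending[c] = i
--     strings[:] = [strings[partner[i]] for i in range(len(strings))]
--     return strings
-- ===== Notes on version B (the rewrite author's own statement) =====
-- stated objective: faster
-- what changed: A scans forward keeping a dict of each first-character's full remaining index list (rebuilt by slicing after every swap), swapping in place as it goes; B makes one pass that pairs each index with the pending unpaired index of the same first character into a partner permutation and then rebuilds the list in one comprehension.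
import Mathlib
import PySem

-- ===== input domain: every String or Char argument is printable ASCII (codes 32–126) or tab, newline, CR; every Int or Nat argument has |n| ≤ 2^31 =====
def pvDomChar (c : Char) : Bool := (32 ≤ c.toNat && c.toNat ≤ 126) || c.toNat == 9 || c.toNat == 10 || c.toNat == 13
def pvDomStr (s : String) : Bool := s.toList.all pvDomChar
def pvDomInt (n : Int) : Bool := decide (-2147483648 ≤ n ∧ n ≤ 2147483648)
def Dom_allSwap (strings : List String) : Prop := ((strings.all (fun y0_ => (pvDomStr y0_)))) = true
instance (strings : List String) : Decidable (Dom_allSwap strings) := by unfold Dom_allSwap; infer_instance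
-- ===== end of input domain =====

-- B replaces A's forward scan with dict-of-remaining-index-lists bookkeeping (index lists
-- rebuilt by slicing after every swap) by a single pass that pairs each index with the
-- pending same-first-character index into a partner permutation and rebuilds the list
-- (objective: faster, measured). Both A and B mutate the argument list in place in
-- Python; the equivalence proved here is about the return value.

-- first character of a string; Python's x[0] (total here, junk ' ' only outside Pre_)
def fcA (s : String) : Char := (PySem.Str.pyGet? s 0).getD ' '

-- ===== PORT A =====
def allSwap (strings : List String) : List String :=
  -- first_chars = [x[0] for x in strings]
  let firstChars := strings.map fcA
  -- unique = {x: [idx for idx, c in enumerate(first_chars) if c == x] for x in first_chars}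
  let unique : PySem.Dict Char (List Nat) :=
    firstChars.foldl
      (fun d x =>
        d.insert x ((List.range firstChars.length).filter (fun i => decide (firstChars.getD i ' ' = x))))
      PySem.Dict.empty
  -- for idx, sub in enumerate(strings): …  (iterates positions 0..len-1 over the MUTATING list)
  ((List.range strings.length).foldl
    (fun (st : List String × PySem.Dict Char (List Nat)) idx =>
      let sub := st.1.getD idx ""
      let c := fcA sub
      match (st.2.getD c []).head? with   -- unique[sub[0]][0]; [] / none unreachable inside Pre_
      | none => st
      | some h =>
        if h < idx ∧ c = firstChars.getD idx ' ' then
          ((st.1.set idx (st.1.getD h "")).set h sub, st.2.insert c ((st.2.getD c []).drop 2))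
        else st)
    (strings, unique)).1

-- ===== PORT B =====
def allSwap_alt (strings : List String) : List String :=
  let n := strings.length
  -- for i, s in enumerate(strings): pair i with the pending unpaired index of s[0]
  let st := (List.range n).foldl
    (fun (st : PySem.Dict Char Nat × List Nat) i =>
      let c := fcA (strings.getD i "")
      match st.1.get? c with
      | some j => (st.1.erase c, (st.2.set i j).set j i)
      | none => (st.1.insert c i, st.2))
    (PySem.Dict.empty, List.range n)
  -- strings[:] = [strings[partner[i]] for i in range(len(strings))]
  (List.range n).map (fun i => strings.getD (st.2.getD i i) "")

-- ===== PRECONDITION & SPEC =====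
-- Pre_ excludes lists containing an empty string: there Python A raises IndexError on x[0]
-- before any mutation (and B raises the same way), so A returns no value.
def Pre_allSwap (strings : List String) : Prop := ∀ s ∈ strings, s ≠ ""
instance (strings : List String) : Decidable (Pre_allSwap strings) := by unfold Pre_allSwap; infer_instance
def pvWitness_allSwap : List String := ["ba", "ab", "bz", "c"]

def Spec_allSwap (strings : List String) (out : List String) : Prop := out = allSwap_alt strings
instance (strings : List String) (out : List String) : Decidable (Spec_allSwap strings out) := by unfold Spec_allSwap; infer_instance

-- ===== CLAIM (what is proved, stated in full; the proofs are below) =====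
def Claim_equal_allSwap : Prop := ∀ (strings : List String), Dom_allSwap strings → Pre_allSwap strings → Spec_allSwap strings (allSwap strings)

-- ===== LEMMAS AND PROOFS =====

-- the loop bodies and initial dict of the two ports, as named functions for the proofs
def pvStepA (first : List Char) (st : List String × PySem.Dict Char (List Nat)) (idx : Nat) :
    List String × PySem.Dict Char (List Nat) :=
  let sub := st.1.getD idx ""
  let c := fcA sub
  match (st.2.getD c []).head? with
  | none => st
  | some h =>
    if h < idx ∧ c = first.getD idx ' ' then
      ((st.1.set idx (st.1.getD h "")).set h sub, st.2.insert c ((st.2.getD c []).drop 2))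
    else st

def pvStepB (strings : List String) (st : PySem.Dict Char Nat × List Nat) (i : Nat) :
    PySem.Dict Char Nat × List Nat :=
  let c := fcA (strings.getD i "")
  match st.1.get? c with
  | some j => (st.1.erase c, (st.2.set i j).set j i)
  | none => (st.1.insert c i, st.2)

def pvUniq0 (first : List Char) : PySem.Dict Char (List Nat) :=
  first.foldl
    (fun d x => d.insert x ((List.range first.length).filter (fun i => decide (first.getD i ' ' = x))))
    PySem.Dict.empty

-- group-members of character c among positions ≥ k (in increasing order)
def pvFiltN (first : List Char) (c : Char) (k n : Nat) : List Nat :=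
  (List.range n).filter (fun i => decide (first.getD i ' ' = c ∧ k ≤ i))

theorem allSwap_eq (strings : List String) :
    allSwap strings =
      ((List.range strings.length).foldl (pvStepA (strings.map fcA))
        (strings, pvUniq0 (strings.map fcA))).1 := rfl

theorem allSwap_alt_eq (strings : List String) :
    allSwap_alt strings =
      (List.range strings.length).map (fun i =>
        strings.getD ((((List.range strings.length).foldl (pvStepB strings)
          (PySem.Dict.empty, List.range strings.length)).2).getD i i) "") := rfl

-- ---- generic list helpers ----
theorem pvGetD_set {α : Type} (l : List α) (j i : Nat) (v d : α) :
    (l.set j v).getD i d = if j = i ∧ j < l.length then v else l.getD i d := by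
  simp only [List.getD_eq_getElem?_getD, List.getElem?_set]
  split_ifs with h1 h2 h3 h4 <;> simp_all <;> omega

theorem pvRange_getD (n i : Nat) : (List.range n).getD i i = i := by
  by_cases h : i < n
  · simp [List.getD_eq_getElem?_getD, List.getElem?_range, h]
  · simp [List.getD_eq_getElem?_getD, List.getElem?_eq_none_iff.mpr, h, List.length_range,
      Nat.le_of_not_lt h]

theorem pvMapRange_getD {α : Type} (f : Nat → α) (n k : Nat) (d : α) (hk : k < n) :
    ((List.range n).map f).getD k d = f k := by
  simp [List.getD_eq_getElem?_getD, List.getElem?_map, List.getElem?_range, hk]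

theorem pvMapRange_set {α : Type} (f : Nat → α) (n k : Nat) (v : α) (hk : k < n) :
    ((List.range n).map f).set k v = (List.range n).map (fun i => if i = k then v else f i) := by
  apply List.ext_getElem
  · simp
  · intro i h1 h2
    simp only [List.length_set, List.length_map, List.length_range] at h1 h2
    by_cases h : i = k
    · simp [List.getElem_set, List.getElem_map, List.getElem_range, h]
    · have hk2 : ¬ k = i := fun e => h e.symm
      simp [List.getElem_set, List.getElem_map, List.getElem_range, h, hk2]

theorem pvMap_getD {α β : Type} (l : List α) (f : α → β) (k : Nat) (d : β) (d' : α)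
    (hk : k < l.length) : (l.map f).getD k d = f (l.getD k d') := by
  simp [List.getD_eq_getElem?_getD, List.getElem?_map, List.getElem?_eq_getElem hk]

-- ---- Dict.erase lookup (not in the PySem lemma list) ----
theorem pvGet?_erase {ν : Type} (d : PySem.Dict Char ν) (k k' : Char) :
    (d.erase k).get? k' = if k' = k then none else d.get? k' := by
  obtain ⟨items⟩ := d
  induction items with
  | nil => simp [PySem.Dict.erase, PySem.Dict.get?]
  | cons p rest ih =>
    simp only [PySem.Dict.erase, PySem.Dict.get?, List.filter_cons] at *
    by_cases h1 : p.1 = k <;> by_cases h2 : p.1 = k' <;> simp_all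

-- ---- pvFiltN facts ----
theorem pvFiltN_succ (first : List Char) (c : Char) (k n : Nat) :
    pvFiltN first c k (n + 1) =
      pvFiltN first c k n ++ (if first.getD n ' ' = c ∧ k ≤ n then [n] else []) := by
  by_cases h : first.getD n ' ' = c ∧ k ≤ n <;>
    simp [pvFiltN, List.range_succ, List.filter_append, List.filter_cons,
      List.getD_eq_getElem?_getD] at h ⊢ <;> simp [h]

theorem pvFiltN_cons (first : List Char) (c : Char) (k n : Nat) (hk : k < n)
    (hc : first.getD k ' ' = c) :
    pvFiltN first c k n = k :: pvFiltN first c (k + 1) n := by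
  induction n with
  | zero => omega
  | succ m ih =>
    rcases Nat.lt_or_ge k m with h | h
    · rw [pvFiltN_succ, pvFiltN_succ, ih h]
      have : (k ≤ m) = (k + 1 ≤ m) := by
        apply propext; omega
      simp only [this, List.cons_append]
    · have hkm : k = m := by omega
      subst hkm
      rw [pvFiltN_succ, pvFiltN_succ]
      have h1 : pvFiltN first c k k = [] := by
        simp only [pvFiltN, List.filter_eq_nil_iff]
        intro i hi
        simp only [List.mem_range] at hi
        simp only [decide_eq_true_eq, not_and]
        omega
      have h2 : pvFiltN first c (k + 1) k = [] := by
        simp only [pvFiltN, List.filter_eq_nil_iff]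
        intro i hi
        simp only [List.mem_range] at hi
        simp only [decide_eq_true_eq, not_and]
        omega
      rw [List.getD_eq_getElem?_getD] at hc
      simp [h1, h2, hc]

theorem pvFiltN_congr (first : List Char) (c : Char) (k n : Nat)
    (h : first.getD k ' ' ≠ c) :
    pvFiltN first c k n = pvFiltN first c (k + 1) n := by
  simp only [pvFiltN]
  apply List.filter_congr
  intro i _
  by_cases hik : i = k
  · subst hik
    rw [List.getD_eq_getElem?_getD] at h
    simp [h]
  · have heq : (k ≤ i) = (k + 1 ≤ i) := by apply propext; omega
    simp only [heq]

theorem pvFiltN_zero_eq (first : List Char) (c : Char) (n : Nat) :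
    pvFiltN first c 0 n = (List.range n).filter (fun i => decide (first.getD i ' ' = c)) := by
  simp [pvFiltN]

theorem pvUniq0_getD (first : List Char) (c : Char) :
    (pvUniq0 first).getD c [] = pvFiltN first c 0 first.length := by
  have main : ∀ (xs : List Char) (d : PySem.Dict Char (List Nat)),
      (xs.foldl (fun d x =>
        d.insert x ((List.range first.length).filter (fun i => decide (first.getD i ' ' = x)))) d).getD c []
      = if c ∈ xs
        then (List.range first.length).filter (fun i => decide (first.getD i ' ' = c))
        else d.getD c [] := by
    intro xs
    induction xs with
    | nil => simp
    | cons x xs ih =>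
      intro d
      simp only [List.foldl_cons, ih, List.mem_cons]
      by_cases hx : c ∈ xs
      · simp [hx]
      · by_cases hcx : c = x
        · subst hcx
          rw [PySem.Dict.getD_insert]
          simp [hx]
        · rw [PySem.Dict.getD_insert]
          simp [hx, hcx]
  rw [pvUniq0, main, pvFiltN_zero_eq]
  by_cases hc : c ∈ first
  · simp [hc]
  · simp only [hc, if_false, PySem.Dict.getD_empty]
    symm
    simp only [List.filter_eq_nil_iff]
    intro i hi
    simp only [List.mem_range] at hi
    rw [List.getD_eq_getElem?_getD, List.getElem?_eq_getElem hi]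
    simp only [Option.getD_some, decide_eq_true_eq]
    intro hgd
    exact hc (hgd ▸ List.getElem_mem hi)

-- ---- invariant relating the two loop states after processing positions < k ----
def pvInv (strings : List String) (k : Nat)
    (a : List String × PySem.Dict Char (List Nat))
    (b : PySem.Dict Char Nat × List Nat) : Prop :=
  (∀ i, k ≤ i → b.2.getD i i = i) ∧
  (a.1 = (List.range strings.length).map (fun i => strings.getD (b.2.getD i i) "")) ∧
  (∀ c, a.2.getD c [] =
    (match b.1.get? c with
     | some j => j :: pvFiltN (strings.map fcA) c k strings.length
     | none => pvFiltN (strings.map fcA) c k strings.length)) ∧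
  (∀ c j, b.1.get? c = some j →
    j < k ∧ (strings.map fcA).getD j ' ' = c ∧ b.2.getD j j = j) ∧
  b.2.length = strings.length

theorem pvInv_init (strings : List String) :
    pvInv strings 0 (strings, pvUniq0 (strings.map fcA))
      (PySem.Dict.empty, List.range strings.length) := by
  refine ⟨?_, ?_, ?_, ?_, ?_⟩
  · intro i _; exact pvRange_getD _ i
  · apply List.ext_getElem
    · simp
    · intro i h1 h2
      simp only [List.length_map, List.length_range] at h2
      rw [List.getElem_map, List.getElem_range, pvRange_getD]
      simp [List.getD_eq_getElem?_getD, List.getElem?_eq_getElem h1]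
  · intro c
    simp only [PySem.Dict.get?_empty]
    rw [pvUniq0_getD]
    simp [List.length_map]
  · intro c j h
    simp [PySem.Dict.get?_empty] at h
  · simp

theorem pvInv_step (strings : List String) (k : Nat) (hk : k < strings.length)
    (a : List String × PySem.Dict Char (List Nat)) (b : PySem.Dict Char Nat × List Nat)
    (h : pvInv strings k a b) :
    pvInv strings (k + 1) (pvStepA (strings.map fcA) a k) (pvStepB strings b k) := by
  obtain ⟨hb, hc1, hd, he, hlen⟩ := h
  have hsubk : a.1.getD k "" = strings.getD k "" := by
    rw [hc1, pvMapRange_getD _ _ _ _ hk, hb k le_rfl]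
  have hck : fcA (strings.getD k "") = (strings.map fcA).getD k ' ' :=
    (pvMap_getD strings fcA k ' ' "" hk).symm
  have hcA : fcA (a.1.getD k "") = (strings.map fcA).getD k ' ' := by rw [hsubk, hck]
  have hfilt : pvFiltN (strings.map fcA) ((strings.map fcA).getD k ' ') k strings.length
      = k :: pvFiltN (strings.map fcA) ((strings.map fcA).getD k ' ') (k + 1) strings.length :=
    pvFiltN_cons _ _ _ _ hk rfl
  cases hp : b.1.get? ((strings.map fcA).getD k ' ') with
  | none =>
    have hgd : a.2.getD ((strings.map fcA).getD k ' ') []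
        = k :: pvFiltN (strings.map fcA) ((strings.map fcA).getD k ' ') (k + 1) strings.length := by
      have := hd ((strings.map fcA).getD k ' ')
      rw [hp] at this
      rw [this, hfilt]
    have haveA : pvStepA (strings.map fcA) a k = a := by
      simp only [pvStepA, hcA, hgd, List.head?_cons]
      rw [if_neg]
      rintro ⟨hlt, -⟩
      omega
    have haveB : pvStepB strings b k = (b.1.insert ((strings.map fcA).getD k ' ') k, b.2) := by
      simp only [pvStepB, hck, hp]
    rw [haveA, haveB]
    refine ⟨fun i hi => hb i (by omega), hc1, ?_, ?_, hlen⟩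
    · intro c'
      rw [PySem.Dict.get?_insert]
      by_cases hcc : c' = (strings.map fcA).getD k ' '
      · subst hcc
        simp only [if_pos rfl]
        exact hgd
      · simp only [if_neg hcc]
        have hcg := pvFiltN_congr (strings.map fcA) c' k strings.length
          (fun e => hcc e.symm)
        have := hd c'
        cases hq : b.1.get? c' <;> rw [hq] at this <;> simp only [this, hcg]
    · intro c' j' hj'
      rw [PySem.Dict.get?_insert] at hj'
      by_cases hcc : c' = (strings.map fcA).getD k ' '
      · rw [if_pos hcc] at hj'
        obtain ⟨rfl⟩ := Option.some.inj hj'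
        exact ⟨by omega, hcc.symm, hb k le_rfl⟩
      · rw [if_neg hcc] at hj'
        obtain ⟨h1, h2, h3⟩ := he c' j' hj'
        exact ⟨by omega, h2, h3⟩
  | some j =>
    obtain ⟨hjk, hfj, hpj⟩ := he ((strings.map fcA).getD k ' ') j hp
    have hjn : j < strings.length := lt_trans hjk hk
    have hgd : a.2.getD ((strings.map fcA).getD k ' ') []
        = j :: pvFiltN (strings.map fcA) ((strings.map fcA).getD k ' ') k strings.length := by
      have := hd ((strings.map fcA).getD k ' ')
      rw [hp] at this
      exact this
    have haveA : pvStepA (strings.map fcA) a k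
        = ((a.1.set k (a.1.getD j "")).set j (a.1.getD k ""),
           a.2.insert ((strings.map fcA).getD k ' ')
             (pvFiltN (strings.map fcA) ((strings.map fcA).getD k ' ') (k + 1) strings.length)) := by
      simp only [pvStepA, hcA, hgd, List.head?_cons]
      rw [if_pos ⟨hjk, trivial⟩, hfilt]
      rfl
    have haveB : pvStepB strings b k
        = (b.1.erase ((strings.map fcA).getD k ' '), (b.2.set k j).set j k) := by
      simp only [pvStepB, hck, hp]
    have hplen : ((b.2.set k j).set j k).length = strings.length := by
      simp [List.length_set, hlen]
    have hp' : ∀ i, ((b.2.set k j).set j k).getD i i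
        = if i = j then k else if i = k then j else b.2.getD i i := by
      intro i
      rw [pvGetD_set, pvGetD_set]
      simp only [List.length_set, hlen]
      split_ifs <;> first | rfl | omega
    rw [haveA, haveB]
    refine ⟨?_, ?_, ?_, ?_, hplen⟩
    · intro i hi
      rw [hp' i, if_neg (by omega), if_neg (by omega)]
      exact hb i (by omega)
    · have a1j : a.1.getD j "" = strings.getD j "" := by
        rw [hc1, pvMapRange_getD _ _ _ _ hjn, hpj]
      rw [a1j, hsubk, hc1, pvMapRange_set _ _ _ _ hk, pvMapRange_set _ _ _ _ hjn]
      refine List.map_congr_left ?_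
      intro i _
      rw [hp' i]
      have hkj : ¬ k = j := by omega
      by_cases hij : i = j
      · simp [hij, hkj]
      · by_cases hik : i = k <;> simp [hij, hik, hkj]
    · intro c'
      by_cases hcc : c' = (strings.map fcA).getD k ' '
      · subst hcc
        rw [pvGet?_erase, if_pos rfl, PySem.Dict.getD_insert, if_pos rfl]
      · rw [pvGet?_erase, if_neg hcc, PySem.Dict.getD_insert, if_neg hcc]
        have hcg := pvFiltN_congr (strings.map fcA) c' k strings.length
          (fun e => hcc e.symm)
        have := hd c'
        cases hq : b.1.get? c' <;> rw [hq] at this <;> simp only [this, hcg]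
    · intro c' j' hj'
      rw [pvGet?_erase] at hj'
      by_cases hcc : c' = (strings.map fcA).getD k ' '
      · rw [if_pos hcc] at hj'
        exact absurd hj' (by simp)
      · rw [if_neg hcc] at hj'
        obtain ⟨h1, h2, h3⟩ := he c' j' hj'
        have hj'j : j' ≠ j := by
          intro e
          exact hcc (by rw [← h2, e, hfj])
        have hj'k : j' ≠ k := by
          intro e
          exact hcc (by rw [← h2, e])
        refine ⟨by omega, h2, ?_⟩
        rw [hp' j', if_neg hj'j, if_neg hj'k]
        exact h3

theorem pvInv_fold (strings : List String) :
    ∀ k, k ≤ strings.length →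
      pvInv strings k
        ((List.range k).foldl (pvStepA (strings.map fcA)) (strings, pvUniq0 (strings.map fcA)))
        ((List.range k).foldl (pvStepB strings) (PySem.Dict.empty, List.range strings.length)) := by
  intro k
  induction k with
  | zero => intro _; exact pvInv_init strings
  | succ m ih =>
    intro hm
    rw [List.range_succ, List.foldl_append, List.foldl_append]
    simp only [List.foldl_cons, List.foldl_nil]
    exact pvInv_step strings m (by omega) _ _ (ih (by omega))

-- ===== VERDICT (by name: the statement is the Claim_ definition above) =====
theorem allSwap_spec : Claim_equal_allSwap := by
  intro strings _ _
  show allSwap strings = allSwap_alt strings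
  rw [allSwap_eq, allSwap_alt_eq]
  exact (pvInv_fold strings strings.length (le_refl _)).2.1
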